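-- pv_equiv track=rewrite | github.com/yiyinghsieh/codewars | easy_line.py | easyline2
-- ===== SOURCE A (Python) =====
-- def easyline2(n):
--     if n <= 1:
--         return sum([1] * (n + 1))
--
--     T = []
--     for i in range(n + 1):
--         T.append([1] * (i + 1))
--
--         for j in range(1, len(T[i]) - 2 + 1):
--             T[i][j] = T[i - 1][j - 1] + T[i - 1][j]
--
--     squared_sum = 0
--     for num in T[-1]:
--         squared_sum += num **2
--     return squared_sum
-- ===== SOURCE B (Python) =====
-- def easyline2(n):
--     # Sum of squares of Pascal's row n equals the central binomial C(2n, n),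
--     # computed by the exact multiplicative formula in O(n).
--     if n < 0:
--         return 0
--     c = 1
--     for i in range(1, n + 1):
--         c = c * (n + i) // i
--     return c
-- ===== Notes on version B (the rewrite author's own statement) =====
-- stated objective: faster
-- what changed: Replaces the O(n^2) Pascal-triangle construction plus squared-sum pass by the closed form C(2n,n) (Vandermonde identity), computed by an O(n) exact multiplicative loop.
import Mathlib
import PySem

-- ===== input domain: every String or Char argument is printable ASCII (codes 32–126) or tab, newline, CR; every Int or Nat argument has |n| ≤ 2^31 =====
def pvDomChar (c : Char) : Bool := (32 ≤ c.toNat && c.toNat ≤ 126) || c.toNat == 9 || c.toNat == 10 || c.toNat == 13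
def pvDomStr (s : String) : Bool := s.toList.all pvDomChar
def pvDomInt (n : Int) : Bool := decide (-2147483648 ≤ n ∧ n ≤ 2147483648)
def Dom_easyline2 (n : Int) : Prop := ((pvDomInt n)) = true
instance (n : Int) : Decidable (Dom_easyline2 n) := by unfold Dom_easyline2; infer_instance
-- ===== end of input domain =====

-- B replaces A's O(n^2) Pascal-triangle build + squared-sum pass by the closed form
-- C(2n,n) (Vandermonde identity), computed by an O(n) exact multiplicative loop.

-- ===== PORT A =====
-- literal transliteration of Source A; list indexing T[i-1][j-1]/T[i-1][j] is always in
-- range here (j runs over 1..i-1), so List.getD 0 never returns its default.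
def easyline2 (n : Int) : Int :=
  if n ≤ 1 then (List.replicate (n + 1).toNat (1 : Int)).sum
  else
    let T : List (List Int) :=
      (PySem.List.pyRange 0 (n + 1) 1).foldl (fun T i =>
        let row0 : List Int := List.replicate (i + 1).toNat 1
        let prev : List Int := T.getLast?.getD []   -- T[i-1] (read before the append)
        let row :=
          (PySem.List.pyRange 1 ((row0.length : Int) - 2 + 1) 1).foldl
            (fun row j =>
              row.set j.toNat (prev.getD (j - 1).toNat 0 + prev.getD j.toNat 0)) row0
        T ++ [row]) []
    (T.getLast?.getD []).foldl (fun s num => s + num ^ 2) 0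

-- ===== PORT B =====
-- literal transliteration of Source B
def easyline2_alt (n : Int) : Int :=
  if n < 0 then 0
  else
    (PySem.List.pyRange 1 (n + 1) 1).foldl
      (fun c i => PySem.Int.floordiv (c * (n + i)) i) 1

-- ===== PRECONDITION & SPEC =====
def Spec_easyline2 (n : Int) (out : Int) : Prop := out = easyline2_alt n
instance (n : Int) (out : Int) : Decidable (Spec_easyline2 n out) := by unfold Spec_easyline2; infer_instance

-- ===== CLAIM (what is proved, stated in full; the proofs are below) =====
def Claim_equal_easyline2 : Prop := ∀ (n : Int), Dom_easyline2 n → Spec_easyline2 n (easyline2 n)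

-- ===== LEMMAS AND PROOFS =====

-- Pascal row i, as Ints
def pRow (i : Nat) : List Int := (List.range (i + 1)).map (fun j => ((i.choose j : Nat) : Int))

-- partially updated row after the inner loop has processed j = 1 .. t
def pMix (k t : Nat) : List Int :=
  (List.range (k + 1)).map (fun j => if j ≤ t then ((k.choose j : Nat) : Int) else 1)

theorem pRow_getD (i j : Nat) (hj : j ≤ i) : (pRow i).getD j 0 = ((i.choose j : Nat) : Int) := by
  simp [pRow, List.getD_eq_getElem?_getD, Nat.lt_succ_of_le hj]

theorem pMix_zero (k : Nat) : pMix k 0 = List.replicate (k + 1) (1 : Int) := by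
  apply List.ext_getElem
  · simp [pMix]
  · intro j h1 h2
    simp only [pMix, List.getElem_map, List.getElem_range, List.getElem_replicate]
    split
    · next h => interval_cases j; simp
    · rfl

theorem pMix_set (k t : Nat) (_ht : t + 1 ≤ k) :
    (pMix k t).set (t + 1) ((k.choose (t + 1) : Nat) : Int) = pMix k (t + 1) := by
  apply List.ext_getElem
  · simp [pMix]
  · intro j h1 h2
    simp only [pMix, List.getElem_set, List.getElem_map, List.getElem_range]
    by_cases hj : t + 1 = j
    · subst hj; simp
    · simp only [hj, if_false]
      by_cases hj2 : j ≤ t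
      · simp [hj2, Nat.le_succ_of_le hj2]
      · have : ¬ j ≤ t + 1 := by omega
        simp [hj2, this]

theorem pMix_last (k : Nat) : pMix k (k - 1) = pRow k := by
  unfold pMix pRow
  apply List.map_congr_left
  intro j hj
  simp only [List.mem_range] at hj
  by_cases h : j ≤ k - 1
  · simp [h]
  · have hjk : j = k := by omega
    simp [hjk]

-- the inner loop (j = 1 .. t) applied to a fresh all-ones row, with prev = pRow (k-1)
theorem inner_loop (k : Nat) (hk : 1 ≤ k) : ∀ (t : Nat), t ≤ k - 1 →
    (PySem.List.pyRange 1 ((t : Int) + 1) 1).foldl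
      (fun row j => row.set j.toNat
        ((pRow (k - 1)).getD (j - 1).toNat 0 + (pRow (k - 1)).getD j.toNat 0))
      (List.replicate (k + 1) (1 : Int)) = pMix k t := by
  intro t
  induction t with
  | zero =>
    intro _
    rw [PySem.List.pyRange_one_eq_nil (by norm_num), List.foldl_nil, pMix_zero]
  | succ t ih =>
    intro ht
    have h1 : (((t + 1 : Nat)) : Int) + 1 = ((t : Int) + 1) + 1 := by push_cast; ring
    rw [h1, PySem.List.pyRange_one_succ_right (by omega), List.foldl_append,
        ih (by omega), List.foldl_cons, List.foldl_nil]
    have e1 : ((t : Int) + 1).toNat = t + 1 := by omega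
    have e2 : ((t : Int) + 1 - 1).toNat = t := by omega
    rw [e1, e2, pRow_getD (k - 1) t (by omega), pRow_getD (k - 1) (t + 1) (by omega)]
    have hp : (k - 1).choose t + (k - 1).choose (t + 1) = k.choose (t + 1) := by
      have hc := Nat.choose_succ_succ (k - 1) t
      simp only [Nat.succ_eq_add_one] at hc
      have hk1 : k - 1 + 1 = k := by omega
      rw [hk1] at hc
      exact hc.symm
    have : ((k - 1).choose t : Int) + ((k - 1).choose (t + 1) : Int) = ((k.choose (t + 1) : Nat) : Int) := by
      exact_mod_cast congrArg (Nat.cast : Nat → Int) hp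
    rw [this, pMix_set k t (by omega)]

-- the outer loop builds the first K Pascal rows
theorem outer_loop : ∀ (K : Nat),
    (PySem.List.pyRange 0 (K : Int) 1).foldl (fun T i =>
        let row0 : List Int := List.replicate (i + 1).toNat 1
        let prev : List Int := T.getLast?.getD []
        let row :=
          (PySem.List.pyRange 1 ((row0.length : Int) - 2 + 1) 1).foldl
            (fun row j =>
              row.set j.toNat (prev.getD (j - 1).toNat 0 + prev.getD j.toNat 0)) row0
        T ++ [row]) [] = (List.range K).map pRow := by
  intro K
  induction K with
  | zero => rw [show ((0 : Nat) : Int) = 0 by rfl, PySem.List.pyRange_one_eq_nil le_rfl]; rfl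
  | succ K ih =>
    have h1 : (((K + 1 : Nat)) : Int) = (K : Int) + 1 := by push_cast; ring
    rw [h1, PySem.List.pyRange_one_succ_right (by positivity), List.foldl_append,
        ih, List.foldl_cons, List.foldl_nil]
    simp only []
    have hrow0 : ((K : Int) + 1).toNat = K + 1 := by omega
    have hlen : ((List.replicate (K + 1) (1 : Int)).length : Int) - 2 + 1 = (K : Int) := by
      simp [List.length_replicate]; ring
    rw [hrow0]
    by_cases hK : K = 0
    · subst hK
      rw [hlen, PySem.List.pyRange_one_eq_nil (by norm_num), List.foldl_nil]
      rfl
    · have hK1 : 1 ≤ K := by omega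
      have hprev : (((List.range K).map pRow).getLast?).getD [] = pRow (K - 1) := by
        rw [List.getLast?_eq_getElem?]
        simp only [List.length_map, List.length_range]
        rw [List.getElem?_map, List.getElem?_range (by omega : K - 1 < K)]
        rfl
      rw [hprev, hlen]
      have hKt : (K : Int) = ((K - 1 : Nat) : Int) + 1 := by omega
      rw [hKt, inner_loop K hK1 (K - 1) le_rfl, pMix_last, List.range_succ, List.map_append]
      rfl

-- B's loop invariant: after i = 1 .. k the accumulator is C(m+k, k)
theorem alt_loop (m : Nat) : ∀ (k : Nat),
    (PySem.List.pyRange 1 ((k : Int) + 1) 1).foldl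
      (fun c i => PySem.Int.floordiv (c * ((m : Int) + i)) i) 1 = (((m + k).choose k : Nat) : Int) := by
  intro k
  induction k with
  | zero => rw [show ((0 : Nat) : Int) + 1 = 1 by rfl, PySem.List.pyRange_one_eq_nil le_rfl]; simp
  | succ k ih =>
    have h1 : (((k + 1 : Nat)) : Int) + 1 = ((k : Int) + 1) + 1 := by push_cast; ring
    rw [h1, PySem.List.pyRange_one_succ_right (by omega), List.foldl_append, ih,
        List.foldl_cons, List.foldl_nil]
    have key : (m + k).choose k * (m + k + 1) = (m + (k + 1)).choose (k + 1) * (k + 1) := by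
      have h := Nat.add_one_mul_choose_eq (m + k) k
      have e : m + (k + 1) = m + k + 1 := by omega
      rw [e, Nat.mul_comm]
      exact h
    have e1 : (((m + k).choose k : Nat) : Int) * ((m : Int) + ((k : Int) + 1))
        = (((m + k).choose k * (m + k + 1) : Nat) : Int) := by push_cast; ring
    have e2 : ((k : Int) + 1) = ((k + 1 : Nat) : Int) := by push_cast; ring
    rw [e1, e2, PySem.Int.floordiv_natCast]
    rw [key, Nat.mul_div_cancel _ (by omega : 0 < k + 1)]

theorem alt_val (m : Nat) : easyline2_alt (m : Int) = (((2 * m).choose m : Nat) : Int) := by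
  unfold easyline2_alt
  rw [if_neg (by omega : ¬ (m : Int) < 0), alt_loop m m, two_mul]

-- squared sum of Pascal's row m is the central binomial coefficient
theorem sq_sum (m : Nat) :
    (pRow m).foldl (fun s num => s + num ^ 2) 0 = (((2 * m).choose m : Nat) : Int) := by
  have hfold : ∀ (l : List Int) (a : Int),
      l.foldl (fun s num => s + num ^ 2) a = a + (l.map (fun x => x ^ 2)).sum := by
    intro l
    induction l with
    | nil => intro a; simp
    | cons x xs ih => intro a; simp only [List.foldl_cons, List.map_cons, List.sum_cons, ih]; ring
  rw [hfold, zero_add]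
  have h1 : ((pRow m).map (fun x => x ^ 2)).sum
      = ∑ j ∈ Finset.range (m + 1), ((m.choose j : Nat) : Int) ^ 2 := by
    simp only [pRow, List.map_map]
    rfl
  rw [h1]
  have h2 : ∑ j ∈ Finset.range (m + 1), ((m.choose j : Nat) : Int) ^ 2
      = ((∑ j ∈ Finset.range (m + 1), (m.choose j) ^ 2 : Nat) : Int) := by push_cast; rfl
  rw [h2, Nat.sum_range_choose_sq]

theorem a_val (m : Nat) (hm : 2 ≤ m) : easyline2 (m : Int) = (((2 * m).choose m : Nat) : Int) := by
  unfold easyline2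
  rw [if_neg (by exact_mod_cast by omega : ¬ (m : Int) ≤ 1)]
  have h1 : (m : Int) + 1 = ((m + 1 : Nat) : Int) := by push_cast; ring
  rw [h1, outer_loop (m + 1)]
  have hlast : (((List.range (m + 1)).map pRow).getLast?).getD [] = pRow m := by
    rw [List.getLast?_eq_getElem?]
    simp only [List.length_map, List.length_range]
    rw [List.getElem?_map, List.getElem?_range (by omega : m + 1 - 1 < m + 1)]
    simp
  show (List.foldl (fun s num => s + num ^ 2) 0
      ((List.map pRow (List.range (m + 1))).getLast?.getD [])) = (((2 * m).choose m : Nat) : Int)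
  rw [hlast, sq_sum]

-- ===== VERDICT (by name: the statement is the Claim_ definition above) =====
theorem easyline2_spec : Claim_equal_easyline2 := by
  intro n _
  unfold Spec_easyline2
  by_cases hn : n < 0
  · unfold easyline2 easyline2_alt
    rw [if_pos (by omega : n ≤ 1), if_pos hn]
    have : (n + 1).toNat = 0 := by omega
    rw [this]
    rfl
  · obtain ⟨m, rfl⟩ := Int.eq_ofNat_of_zero_le (not_lt.mp hn)
    rcases m with _ | _ | k
    · rw [alt_val 0]; norm_num [easyline2, Nat.choose]
    · rw [alt_val 1]; norm_num [easyline2, Nat.choose]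
    · rw [a_val (k + 2) (by omega), alt_val]
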